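-- pv_equiv track=rewrite | github.com/YickelFuboo/Pando-KnowledegBase-Service | app/infrastructure/llms/chat_models/schemes.py | _final_brace_depth
-- ===== SOURCE A (Python) =====
-- def _final_brace_depth(text: str) -> int:
--     # 计算最后一个大括号的深度
--     i=0
--     n=len(text)
--     depth=0
--     in_str=False
--     esc=False
--     while i<n:
--         ch=text[i]
--         if in_str:
--             if esc:
--                 esc=False
--             elif ch=="\\":
--                 esc=True
--             elif ch=='"':
--                 in_str=False
--         else:
--             if ch=='"':
--                 in_str=True
--             elif ch=="{":
--                 depth+=1
--             elif ch=="}":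
--                 depth-=1
--                 if depth<0:
--                     depth=0
--         i+=1
--     return depth
-- ===== SOURCE B (Python) =====
-- def _strip_strings(text):
--     # first pass: drop every string literal (quote to matching unescaped quote,
--     # or to end of input if unterminated)
--     out = []
--     i = 0
--     n = len(text)
--     while i < n:
--         ch = text[i]
--         if ch == '"':
--             i += 1
--             while i < n:
--                 c = text[i]
--                 if c == '\\':
--                     i += 2
--                 elif c == '"':
--                     i += 1
--                     break
--                 else:
--                     i += 1
--         else:
--             out.append(ch)
--             i += 1
--     return ''.join(out)
--
--
-- def _final_brace_depth(text: str) -> int: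
--     # second pass: count braces in the string-free text
--     depth = 0
--     for ch in _strip_strings(text):
--         if ch == '{':
--             depth += 1
--         elif ch == '}':
--             depth = max(depth - 1, 0)
--     return depth
-- ===== Notes on version B (the rewrite author's own statement) =====
-- stated objective: alternative
-- what changed: Replaced the single interleaved state machine (in_str/esc flags updated per character) with a tokenize-then-count decomposition: one pass strips string literals, a second pass counts only braces.
import Mathlib
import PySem

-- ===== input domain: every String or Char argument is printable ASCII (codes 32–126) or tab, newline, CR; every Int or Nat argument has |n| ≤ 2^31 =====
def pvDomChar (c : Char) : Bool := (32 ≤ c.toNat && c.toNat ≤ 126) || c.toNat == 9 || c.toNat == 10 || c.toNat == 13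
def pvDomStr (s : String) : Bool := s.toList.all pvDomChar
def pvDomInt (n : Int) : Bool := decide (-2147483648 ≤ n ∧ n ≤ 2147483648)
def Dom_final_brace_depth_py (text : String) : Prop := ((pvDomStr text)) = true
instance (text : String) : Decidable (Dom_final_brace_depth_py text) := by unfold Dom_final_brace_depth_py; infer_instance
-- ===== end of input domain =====

-- B replaces A's one-pass in_str/esc state machine by a strip-string-literals pass
-- followed by a plain brace-counting pass (alternative decomposition, same cost).

-- ===== PORT A =====
-- A's while loop over indices, as a structural recursion over the character list
-- carrying the exact loop state (depth, in_str, esc); branches in A's order.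
def fbdGoA : List Char → Int → Bool → Bool → Int
  | [], depth, _, _ => depth
  | ch :: rest, depth, in_str, esc =>
      if in_str then
        if esc then fbdGoA rest depth in_str false
        else if ch = '\\' then fbdGoA rest depth in_str true
        else if ch = '"' then fbdGoA rest depth false esc
        else fbdGoA rest depth in_str esc
      else
        if ch = '"' then fbdGoA rest depth true esc
        else if ch = '{' then fbdGoA rest (depth + 1) in_str esc
        else if ch = '}' then
          fbdGoA rest (if depth - 1 < 0 then 0 else depth - 1) in_str esc
        else fbdGoA rest depth in_str esc

def final_brace_depth_py (text : String) : Int :=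
  fbdGoA text.toList 0 false false

-- ===== PORT B =====
-- the inner while loop of _strip_strings: skip to the end of a string literal
def fbdSkipStr : List Char → List Char
  | [] => []
  | c :: rest =>
      if c = '\\' then fbdSkipStr rest.tail
      else if c = '"' then rest
      else fbdSkipStr rest
termination_by l => l.length
decreasing_by
  all_goals simp [List.length_tail]
  all_goals omega

theorem fbdSkipStr_le_aux (n : ℕ) :
    ∀ l : List Char, l.length ≤ n → (fbdSkipStr l).length ≤ l.length := by
  induction n with
  | zero =>
      intro l hl
      have : l = [] := List.length_eq_zero_iff.mp (Nat.le_zero.mp hl)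
      subst this; simp [fbdSkipStr]
  | succ n ih =>
      intro l hl
      match l with
      | [] => simp [fbdSkipStr]
      | c :: rest =>
          simp only [List.length_cons] at hl
          rw [fbdSkipStr]
          split
          · have h1 := ih rest.tail (by simp [List.length_tail]; omega)
            have h2 := rest.length_tail
            simp only [List.length_cons]; omega
          · split
            · simp
            · have h1 := ih rest (by omega)
              simp only [List.length_cons]; omega

theorem fbdSkipStr_length_le (l : List Char) : (fbdSkipStr l).length ≤ l.length :=
  fbdSkipStr_le_aux l.length l le_rfl

-- the outer while loop of _strip_strings
def fbdStrip : List Char → List Char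
  | [] => []
  | c :: rest =>
      if c = '"' then fbdStrip (fbdSkipStr rest)
      else c :: fbdStrip rest
termination_by l => l.length
decreasing_by
  · have := fbdSkipStr_length_le rest; simp; omega
  · simp

-- the counting for-loop of _final_brace_depth
def fbdCount : List Char → Int → Int
  | [], depth => depth
  | c :: rest, depth =>
      if c = '{' then fbdCount rest (depth + 1)
      else if c = '}' then fbdCount rest (max (depth - 1) 0)
      else fbdCount rest depth

def final_brace_depth_py_alt (text : String) : Int :=
  fbdCount (fbdStrip text.toList) 0

-- ===== PRECONDITION & SPEC =====
def Spec_final_brace_depth_py (text : String) (out : Int) : Prop := out = final_brace_depth_py_alt text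
instance (text : String) (out : Int) : Decidable (Spec_final_brace_depth_py text out) := by unfold Spec_final_brace_depth_py; infer_instance

-- ===== CLAIM (what is proved, stated in full; the proofs are below) =====
def Claim_equal_final_brace_depth_py : Prop := ∀ (text : String), Dom_final_brace_depth_py text → Spec_final_brace_depth_py text (final_brace_depth_py text)

-- ===== LEMMAS AND PROOFS =====

-- inside a string literal (esc = false), A's run equals restarting outside the
-- literal at the position B's fbdSkipStr jumps to
theorem fbdGoA_in_str (n : ℕ) :
    ∀ l : List Char, l.length ≤ n → ∀ d : Int,
      fbdGoA l d true false = fbdGoA (fbdSkipStr l) d false false := by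
  induction n with
  | zero =>
      intro l hl d
      have : l = [] := List.length_eq_zero_iff.mp (Nat.le_zero.mp hl)
      subst this; simp [fbdSkipStr, fbdGoA]
  | succ n ih =>
      intro l hl d
      match l with
      | [] => simp [fbdSkipStr, fbdGoA]
      | c :: rest =>
          by_cases hb : c = '\\'
          · subst hb
            rw [fbdSkipStr]; simp only [if_pos rfl]
            show fbdGoA rest d true true = _
            match rest with
            | [] => simp [fbdSkipStr, fbdGoA]
            | c2 :: r2 =>
                have : fbdGoA (c2 :: r2) d true true = fbdGoA r2 d true false := by
                  simp [fbdGoA]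
                rw [this, List.tail_cons]
                exact ih r2 (by simp at hl; omega) d
          · by_cases hq : c = '"'
            · subst hq
              rw [fbdSkipStr]; simp [fbdGoA]
            · rw [fbdSkipStr, if_neg hb, if_neg hq]
              have : fbdGoA (c :: rest) d true false = fbdGoA rest d true false := by
                simp [fbdGoA, hb, hq]
              rw [this]
              exact ih rest (by simp at hl; omega) d
  termination_by n

-- main invariant: A's run outside a string equals B's count over the stripped text
theorem fbd_main (n : ℕ) :
    ∀ l : List Char, l.length ≤ n → ∀ d : Int,
      fbdGoA l d false false = fbdCount (fbdStrip l) d := by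
  induction n with
  | zero =>
      intro l hl d
      have : l = [] := List.length_eq_zero_iff.mp (Nat.le_zero.mp hl)
      subst this; simp [fbdStrip, fbdCount, fbdGoA]
  | succ n ih =>
      intro l hl d
      match l with
      | [] => simp [fbdStrip, fbdCount, fbdGoA]
      | c :: rest =>
          simp only [List.length_cons] at hl
          by_cases hq : c = '"'
          · subst hq
            rw [fbdStrip]; simp only [if_pos rfl]
            have h1 : fbdGoA ('"' :: rest) d false false = fbdGoA rest d true false := by
              simp [fbdGoA]
            rw [h1, fbdGoA_in_str rest.length rest le_rfl d]
            exact ih (fbdSkipStr rest)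
              (le_trans (fbdSkipStr_length_le rest) (by omega)) d
          · rw [fbdStrip, if_neg hq]
            by_cases ho : c = '{'
            · subst ho
              have h1 : fbdGoA ('{' :: rest) d false false = fbdGoA rest (d + 1) false false := by
                simp [fbdGoA]
              rw [h1, fbdCount, if_pos rfl]
              exact ih rest (by omega) (d + 1)
            · by_cases hc : c = '}'
              · subst hc
                have h1 : fbdGoA ('}' :: rest) d false false
                    = fbdGoA rest (if d - 1 < 0 then 0 else d - 1) false false := by
                  simp [fbdGoA]
                rw [h1, fbdCount]
                simp only [if_neg (by decide : ¬('}' = '{')), if_pos rfl]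
                have : (if d - 1 < 0 then (0 : Int) else d - 1) = max (d - 1) 0 := by
                  split <;> omega
                rw [this]
                exact ih rest (by omega) _
              · have h1 : fbdGoA (c :: rest) d false false = fbdGoA rest d false false := by
                  simp [fbdGoA, hq, ho, hc]
                rw [h1, fbdCount, if_neg ho, if_neg hc]
                exact ih rest (by omega) d
  termination_by n

-- ===== VERDICT (by name: the statement is the Claim_ definition above) =====
theorem final_brace_depth_py_spec : Claim_equal_final_brace_depth_py := by
  intro text _
  unfold Spec_final_brace_depth_py final_brace_depth_py final_brace_depth_py_alt
  exact fbd_main text.toList.length text.toList le_rfl 0
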